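-- pv_equiv track=rewrite | github.com/borjasotomayor/advent-of-code | 2021/day17.py | check_velocities
-- ===== SOURCE A (Python) =====
-- def launch(vel_x, vel_y, min_x, max_x, min_y, max_y):
--     """
--     Launch a probe with a given velocity, and check whether
--     it reaches a target area (and, if so, return the largest
--     value of y it reached)
--     """
--     x, y = 0, 0
--
--     largest_y = 0
--     while True:
--         x += vel_x
--         y += vel_y
--
--         if y > largest_y:
--             largest_y = y
--
--         # Are we in the target area, or have we gone
--         # past it?
--         if min_x <= x <= max_x and min_y <= y <= max_y:
--             return True, largest_y
--         elif x > max_x or y < min_y: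
--             return False, None
--
--         if vel_x > 0:
--             vel_x -= 1
--         elif vel_x < 0:
--             vel_x += 1
--
--         vel_y -= 1
--
-- def check_velocities(target_min_x, target_max_x,
--                      target_min_y, target_max_y,
--                      lb_x, ub_x, lb_y, ub_y):
--     """
--     Check all the velocities within a given range, and check whether
--     the probe reaches the target. This function solves both parts 1 and 2:
--     it finds the largest value of y, and also counts up the number of probes
--     that end up in the target area.
--     """
--     best_y = 0
--     best_vel_x = 0
--     best_vel_y = 0
--     num_in_target = 0
--     for vel_x in range(lb_x, ub_x):
--         for vel_y in range(lb_y, ub_y):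
--             in_target, largest_y = launch(vel_x, vel_y, target_min_x, target_max_x,
--                                                         target_min_y, target_max_y)
--             if in_target:
--                 num_in_target += 1
--                 if largest_y > best_y:
--                     best_y = largest_y
--                     best_vel_x = vel_x
--                     best_vel_y = vel_y
--
--     return best_y, best_vel_x, best_vel_y, num_in_target
-- ===== SOURCE B (Python) =====
-- def _tri(t):
--     return t * (t - 1) // 2
--
--
-- def _ypos(vel_y, t):
--     # y-position after t steps, in closed form
--     return vel_y * t - _tri(t)
--
--
-- def _apex(vel_y, t):
--     # max(0, highest y over steps 1..t), in closed form
--     if vel_y > 0: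
--         return _ypos(vel_y, min(t, vel_y))
--     return 0
--
--
-- def _probe(vel_x, vel_y, min_x, max_x, min_y, max_y):
--     # Walk the time axis with closed-form positions (the _xpos/_ypos formulas,
--     # inlined for speed); T is a provable upper bound on the time at which y
--     # has sunk below min_y.
--     T = 2 * max(vel_y, 0) + abs(min_y) + 2
--     for t in range(1, T + 1):
--         tri = t * (t - 1) // 2
--         if vel_x < 0:
--             x = -(-vel_x * t - tri) if t <= -vel_x else -(-vel_x * (-vel_x + 1) // 2)
--         else:
--             x = vel_x * t - tri if t <= vel_x else vel_x * (vel_x + 1) // 2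
--         y = vel_y * t - tri
--         if min_x <= x <= max_x and min_y <= y <= max_y:
--             return True, _apex(vel_y, t)
--         if x > max_x or y < min_y:
--             return False, 0
--     return False, 0
--
--
-- def check_velocities(target_min_x, target_max_x,
--                      target_min_y, target_max_y,
--                      lb_x, ub_x, lb_y, ub_y):
--     hits = []
--     for vel_x in range(lb_x, ub_x):
--         for vel_y in range(lb_y, ub_y):
--             hit, apex = _probe(vel_x, vel_y, target_min_x, target_max_x,
--                                target_min_y, target_max_y)
--             if hit:
--                 hits.append((vel_x, vel_y, apex))
--     num_in_target = len(hits)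
--     m = max([a for (_, _, a) in hits], default=0)
--     if m > 0:
--         for (vx, vy, a) in hits:
--             if a == m:
--                 return m, vx, vy, num_in_target
--     return 0, 0, 0, num_in_target
-- ===== Notes on version B (the rewrite author's own statement) =====
-- stated objective: alternative
-- what changed: B replaces the stateful per-step trajectory simulation by closed-form position formulas (triangular-number x/y positions, drag handled by min-with-apex, apex vel_y*(vel_y+1)//2 style formula) walked over an explicitly bounded time range, and replaces A's running best/count state machine by collect-all-hits, then len + max(default=0) + first-match selection.
import Mathlib
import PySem

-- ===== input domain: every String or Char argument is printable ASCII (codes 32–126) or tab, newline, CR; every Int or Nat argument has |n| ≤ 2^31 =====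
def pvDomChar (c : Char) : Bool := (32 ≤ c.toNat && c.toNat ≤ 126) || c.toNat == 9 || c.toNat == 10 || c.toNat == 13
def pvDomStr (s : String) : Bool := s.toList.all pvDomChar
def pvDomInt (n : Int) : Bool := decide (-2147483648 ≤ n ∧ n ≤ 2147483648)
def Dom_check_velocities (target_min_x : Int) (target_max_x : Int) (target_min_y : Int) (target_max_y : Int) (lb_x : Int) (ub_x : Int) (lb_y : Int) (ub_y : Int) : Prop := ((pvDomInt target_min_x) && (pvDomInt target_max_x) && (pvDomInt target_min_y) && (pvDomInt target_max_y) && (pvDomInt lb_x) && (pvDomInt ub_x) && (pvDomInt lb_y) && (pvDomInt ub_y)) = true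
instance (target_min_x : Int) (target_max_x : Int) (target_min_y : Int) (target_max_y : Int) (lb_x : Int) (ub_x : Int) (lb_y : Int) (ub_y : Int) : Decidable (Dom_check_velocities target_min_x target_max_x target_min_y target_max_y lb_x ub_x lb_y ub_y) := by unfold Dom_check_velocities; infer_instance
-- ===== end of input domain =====

-- B replaces the step-by-step trajectory simulation by closed-form positions walked
-- over a bounded time range, and the running best/count state by collect-then-select
-- (alternative decomposition; not claimed faster).

-- ===== PORT A =====
-- A's while-loop in `launch`; terminates because vel_y decreases every step and,
-- once vel_y < 0, y strictly decreases while the loop requires y ≥ min_y.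
def pvLaunchLoop (min_x max_x min_y max_y x y vel_x vel_y largest_y : Int) : Bool × Option Int :=
  let x' := x + vel_x
  let y' := y + vel_y
  let largest' := if largest_y < y' then y' else largest_y
  if _h1 : min_x ≤ x' ∧ x' ≤ max_x ∧ min_y ≤ y' ∧ y' ≤ max_y then (true, some largest')
  else if _h2 : max_x < x' ∨ y' < min_y then (false, none)
  else
    pvLaunchLoop min_x max_x min_y max_y x' y'
      (if 0 < vel_x then vel_x - 1 else if vel_x < 0 then vel_x + 1 else vel_x)
      (vel_y - 1) largest'
termination_by ((vel_y + 1).toNat, (y + vel_y - min_y + 1).toNat)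
decreasing_by
  simp only [Prod.lex_iff]
  push_neg at _h2
  omega

def pvLaunch (vel_x vel_y min_x max_x min_y max_y : Int) : Bool × Option Int :=
  pvLaunchLoop min_x max_x min_y max_y 0 0 vel_x vel_y 0

def check_velocities (target_min_x : Int) (target_max_x : Int) (target_min_y : Int) (target_max_y : Int) (lb_x : Int) (ub_x : Int) (lb_y : Int) (ub_y : Int) : Int × Int × Int × Int :=
  (PySem.List.pyRange lb_x ub_x 1).foldl (fun st vel_x =>
    (PySem.List.pyRange lb_y ub_y 1).foldl (fun st vel_y =>
      match st with
      | (best_y, best_vel_x, best_vel_y, num_in_target) =>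
        let r := pvLaunch vel_x vel_y target_min_x target_max_x target_min_y target_max_y
        if r.1 then
          -- in Python largest_y is an int whenever in_target; `.getD 0` reads that int
          let largest_y := r.2.getD 0
          if best_y < largest_y then (largest_y, vel_x, vel_y, num_in_target + 1)
          else (best_y, best_vel_x, best_vel_y, num_in_target + 1)
        else st) st)
    (0, 0, 0, 0)

-- ===== PORT B =====
def pvTri (t : Int) : Int := PySem.Int.floordiv (t * (t - 1)) 2

def pvXposNN (vel_x t : Int) : Int :=
  if t ≤ vel_x then vel_x * t - pvTri t
  else PySem.Int.floordiv (vel_x * (vel_x + 1)) 2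

def pvXpos (vel_x t : Int) : Int :=
  if vel_x < 0 then -(pvXposNN (-vel_x) t) else pvXposNN vel_x t

def pvYpos (vel_y t : Int) : Int := vel_y * t - pvTri t

def pvApex (vel_y t : Int) : Int :=
  if 0 < vel_y then pvYpos vel_y (min t vel_y) else 0

def pvProbeGo (vel_x vel_y min_x max_x min_y max_y : Int) : List Int → Bool × Int
  | [] => (false, 0)
  | t :: ts =>
    let x := pvXpos vel_x t
    let y := pvYpos vel_y t
    if min_x ≤ x ∧ x ≤ max_x ∧ min_y ≤ y ∧ y ≤ max_y then (true, pvApex vel_y t)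
    else if max_x < x ∨ y < min_y then (false, 0)
    else pvProbeGo vel_x vel_y min_x max_x min_y max_y ts

def pvProbe (vel_x vel_y min_x max_x min_y max_y : Int) : Bool × Int :=
  let T := 2 * max vel_y 0 + |min_y| + 2
  pvProbeGo vel_x vel_y min_x max_x min_y max_y (PySem.List.pyRange 1 (T + 1) 1)

def check_velocities_alt (target_min_x : Int) (target_max_x : Int) (target_min_y : Int) (target_max_y : Int) (lb_x : Int) (ub_x : Int) (lb_y : Int) (ub_y : Int) : Int × Int × Int × Int :=
  let hits : List (Int × Int × Int) :=
    (PySem.List.pyRange lb_x ub_x 1).flatMap (fun vel_x =>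
      (PySem.List.pyRange lb_y ub_y 1).filterMap (fun vel_y =>
        let r := pvProbe vel_x vel_y target_min_x target_max_x target_min_y target_max_y
        if r.1 then some (vel_x, vel_y, r.2) else none))
  let num_in_target : Int := hits.length
  let m : Int := PySem.List.maxD (hits.map (fun p => p.2.2)) (fun a => a) 0
  if 0 < m then
    match hits.find? (fun p => p.2.2 == m) with
    | some (vx, vy, _) => (m, vx, vy, num_in_target)
    | none => (0, 0, 0, num_in_target)
  else (0, 0, 0, num_in_target)

-- ===== PRECONDITION & SPEC =====
def Spec_check_velocities (target_min_x : Int) (target_max_x : Int) (target_min_y : Int) (target_max_y : Int) (lb_x : Int) (ub_x : Int) (lb_y : Int) (ub_y : Int) (out : Int × Int × Int × Int) : Prop := out = check_velocities_alt target_min_x target_max_x target_min_y target_max_y lb_x ub_x lb_y ub_y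
instance (target_min_x : Int) (target_max_x : Int) (target_min_y : Int) (target_max_y : Int) (lb_x : Int) (ub_x : Int) (lb_y : Int) (ub_y : Int) (out : Int × Int × Int × Int) : Decidable (Spec_check_velocities target_min_x target_max_x target_min_y target_max_y lb_x ub_x lb_y ub_y out) := by unfold Spec_check_velocities; infer_instance

-- ===== CLAIM (what is proved, stated in full; the proofs are below) =====
def Claim_equal_check_velocities : Prop := ∀ (target_min_x : Int) (target_max_x : Int) (target_min_y : Int) (target_max_y : Int) (lb_x : Int) (ub_x : Int) (lb_y : Int) (ub_y : Int), Dom_check_velocities target_min_x target_max_x target_min_y target_max_y lb_x ub_x lb_y ub_y → Spec_check_velocities target_min_x target_max_x target_min_y target_max_y lb_x ub_x lb_y ub_y (check_velocities target_min_x target_max_x target_min_y target_max_y lb_x ub_x lb_y ub_y)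

-- ===== LEMMAS AND PROOFS =====

-- proof-side helpers
def pvConv (r : Bool × Option Int) : Bool × Int :=
  if r.1 then (true, r.2.getD 0) else (false, 0)

def pvDecay (vx s : Int) : Int :=
  if 0 ≤ vx then (if s ≤ vx then vx - s else 0) else (if s ≤ -vx then vx + s else 0)

def pvFA (mnx mxx mny mxy : Int) (st : Int × Int × Int × Int) (pr : Int × Int) : Int × Int × Int × Int :=
  match st with
  | (best_y, best_vel_x, best_vel_y, num_in_target) =>
    let r := pvLaunch pr.1 pr.2 mnx mxx mny mxy
    if r.1 then
      let largest_y := r.2.getD 0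
      if best_y < largest_y then (largest_y, pr.1, pr.2, num_in_target + 1)
      else (best_y, best_vel_x, best_vel_y, num_in_target + 1)
    else st

def pvHF (mnx mxx mny mxy : Int) (pr : Int × Int) : Option (Int × Int × Int) :=
  let r := pvProbe pr.1 pr.2 mnx mxx mny mxy
  if r.1 then some (pr.1, pr.2, r.2) else none

def pvFoldMax (H : List (Int × Int × Int)) (b : Int) : Int :=
  H.foldl (fun acc p => max acc p.2.2) b

def pvBestFold (H : List (Int × Int × Int)) (st : Int × Int × Int) : Int × Int × Int :=
  H.foldl (fun st p => if st.1 < p.2.2 then (p.2.2, p.1, p.2.1) else st) st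

-- arithmetic about triangular numbers and closed-form positions
theorem pvTwoTri (t : Int) : 2 * pvTri t = t * (t - 1) := by
  unfold pvTri
  obtain ⟨k, hk⟩ := Int.even_mul_succ_self (t - 1)
  have h2 : t * (t - 1) = 2 * k := by ring_nf at hk ⊢; linarith
  rw [h2, PySem.Int.floordiv_eq_ediv_of_pos (by norm_num),
    Int.mul_ediv_cancel_left _ (by norm_num)]

theorem pvTri_step (s : Int) : pvTri (s + 1) = pvTri s + s := by
  have h1 := pvTwoTri (s + 1); have h2 := pvTwoTri s; ring_nf at h1 h2 ⊢; linarith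

theorem pvHalfConsec (v : Int) : PySem.Int.floordiv (v * (v + 1)) 2 = pvTri (v + 1) := by
  unfold pvTri; congr 1; ring

theorem pvTri_zero : pvTri 0 = 0 := by have := pvTwoTri 0; omega

theorem pvYpos_zero (vy : Int) : pvYpos vy 0 = 0 := by
  simp [pvYpos, pvTri_zero]

theorem pvXpos_zero (vx : Int) : pvXpos vx 0 = 0 := by
  unfold pvXpos pvXposNN
  by_cases h : vx < 0
  · rw [if_pos h, if_pos (by omega : (0:Int) ≤ -vx)]
    simp [pvTri_zero]
  · rw [if_neg h, if_pos (by omega : (0:Int) ≤ vx)]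
    simp [pvTri_zero]

theorem pvApex_zero (vy : Int) : pvApex vy 0 = 0 := by
  unfold pvApex
  split_ifs with h
  · rw [min_eq_left (by omega), pvYpos_zero]
  · rfl

theorem pvDecay_zero (vx : Int) : pvDecay vx 0 = vx := by
  unfold pvDecay; split_ifs <;> omega

theorem pvXposNN_step (vx s : Int) (hv : 0 ≤ vx) (hs : 0 ≤ s) :
    pvXposNN vx (s + 1) = pvXposNN vx s + (if s ≤ vx then vx - s else 0) := by
  unfold pvXposNN
  by_cases h1 : s + 1 ≤ vx
  · rw [if_pos h1, if_pos (by omega : s ≤ vx), if_pos (by omega : s ≤ vx), pvTri_step]; ring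
  · rw [if_neg (by omega : ¬ (s + 1 ≤ vx))]
    by_cases h2 : s ≤ vx
    · have hsv : s = vx := by omega
      subst hsv
      rw [if_pos le_rfl, if_pos le_rfl, pvHalfConsec]
      have h3 := pvTwoTri (s + 1); have h4 := pvTwoTri s
      ring_nf at h3 h4 ⊢; linarith
    · rw [if_neg (by omega : ¬ (s ≤ vx)), if_neg (by omega : ¬ (s ≤ vx))]; ring

theorem pvXpos_step (vx s : Int) (hs : 0 ≤ s) :
    pvXpos vx (s + 1) = pvXpos vx s + pvDecay vx s := by
  unfold pvXpos pvDecay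
  by_cases h : vx < 0
  · rw [if_pos h, if_pos h, if_neg (by omega : ¬ (0 ≤ vx)), pvXposNN_step (-vx) s (by omega) hs]
    split_ifs <;> ring
  · rw [if_neg h, if_neg h, if_pos (by omega : (0:Int) ≤ vx),
      pvXposNN_step vx s (by omega) hs]

theorem pvDecay_step (vx s : Int) (hs : 0 ≤ s) :
    (if 0 < pvDecay vx s then pvDecay vx s - 1
     else if pvDecay vx s < 0 then pvDecay vx s + 1 else pvDecay vx s) = pvDecay vx (s + 1) := by
  unfold pvDecay; split_ifs <;> omega

theorem pvYpos_step (vy s : Int) : pvYpos vy (s + 1) = pvYpos vy s + (vy - s) := by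
  unfold pvYpos; rw [pvTri_step]; ring

theorem pvYpos_double (vy t : Int) : 2 * pvYpos vy t = t * (2 * vy - t + 1) := by
  unfold pvYpos; have := pvTwoTri t; ring_nf at this ⊢; linarith

theorem pvYpos_nonpos (vy t : Int) (hvy : vy ≤ 0) (ht : 1 ≤ t) : pvYpos vy t ≤ 0 := by
  have h1 := pvYpos_double vy t
  have h2 : t * (2 * vy - t + 1) ≤ 0 :=
    mul_nonpos_of_nonneg_of_nonpos (by omega) (by omega)
  linarith

theorem pvYpos_le_apex (vy w : Int) (hvy : 0 < vy) (hw : vy ≤ w) :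
    pvYpos vy w ≤ pvYpos vy vy := by
  have h1 := pvYpos_double vy w
  have h2 := pvYpos_double vy vy
  have h3 : 0 ≤ (w - vy) * (w - vy - 1) := by
    rcases eq_or_lt_of_le hw with h | h
    · rw [← h]; simp
    · exact mul_nonneg (by omega) (by omega)
  nlinarith

theorem pvApex_step (vy s : Int) (hs : 0 ≤ s) :
    (if pvApex vy s < pvYpos vy (s + 1) then pvYpos vy (s + 1) else pvApex vy s) = pvApex vy (s + 1) := by
  unfold pvApex
  by_cases hvy : 0 < vy
  · rw [if_pos hvy, if_pos hvy]
    by_cases h1 : s + 1 ≤ vy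
    · rw [min_eq_left (by omega), min_eq_left h1]
      have hlt : pvYpos vy s < pvYpos vy (s + 1) := by
        have := pvYpos_step vy s; omega
      rw [if_pos hlt]
    · rw [min_eq_right (by omega), min_eq_right (by omega)]
      rw [if_neg (not_lt.2 (pvYpos_le_apex vy (s + 1) hvy (by omega)))]
  · rw [if_neg (by omega : ¬ (0 < vy)), if_neg (by omega : ¬ (0 < vy))]
    rw [if_neg (not_lt.2 (pvYpos_nonpos vy (s + 1) (by omega) (by omega)))]

theorem pvYpos_big_lt (vy mny t : Int) (ht : 2 * max vy 0 + |mny| + 2 ≤ t) :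
    pvYpos vy t < mny := by
  have hM1 : vy ≤ max vy 0 := le_max_left _ _
  have hM2 : (0 : Int) ≤ max vy 0 := le_max_right _ _
  have hN1 : (0 : Int) ≤ |mny| := abs_nonneg _
  have hN2 : -|mny| ≤ mny := neg_abs_le _
  have key := pvYpos_double vy t
  have h1 : 2 * vy - t + 1 ≤ -(|mny| + 1) := by omega
  have h2 : t * (2 * vy - t + 1) ≤ t * (-(|mny| + 1)) :=
    mul_le_mul_of_nonneg_left h1 (by omega)
  have h3 : t * (-(|mny| + 1)) ≤ 2 * (-(|mny| + 1)) :=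
    mul_le_mul_of_nonpos_right (by omega) (by omega)
  linarith

theorem pvApex_nonneg (vy t : Int) (ht : 1 ≤ t) : 0 ≤ pvApex vy t := by
  unfold pvApex
  split_ifs with hvy
  · have h1 : 1 ≤ min t vy := le_min ht (by omega)
    have h2 : min t vy ≤ vy := min_le_right _ _
    have h3 := pvYpos_double vy (min t vy)
    have h4 : 0 ≤ (min t vy) * (2 * vy - min t vy + 1) :=
      mul_nonneg (by omega) (by omega)
    linarith
  · exact le_refl 0

-- one-step unfolding of A's while loop
theorem pvLaunchLoop_eq (min_x max_x min_y max_y x y vel_x vel_y largest_y : Int) :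
    pvLaunchLoop min_x max_x min_y max_y x y vel_x vel_y largest_y =
      (if min_x ≤ x + vel_x ∧ x + vel_x ≤ max_x ∧ min_y ≤ y + vel_y ∧ y + vel_y ≤ max_y then
        (true, some (if largest_y < y + vel_y then y + vel_y else largest_y))
      else if max_x < x + vel_x ∨ y + vel_y < min_y then (false, none)
      else
        pvLaunchLoop min_x max_x min_y max_y (x + vel_x) (y + vel_y)
          (if 0 < vel_x then vel_x - 1 else if vel_x < 0 then vel_x + 1 else vel_x)
          (vel_y - 1) (if largest_y < y + vel_y then y + vel_y else largest_y)) := by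
  rw [pvLaunchLoop]
  simp only [dite_eq_ite]

-- the core correspondence: B's closed-form time walk computes A's simulation
theorem pvLoop_corr (mnx mxx mny mxy vx vy : Int) :
    ∀ (k : Nat) (t : Int), 1 ≤ t →
      t + (k : Int) = 2 * max vy 0 + |mny| + 2 + 1 →
      pvProbeGo vx vy mnx mxx mny mxy (PySem.List.pyRange t (2 * max vy 0 + |mny| + 2 + 1) 1) =
        pvConv (pvLaunchLoop mnx mxx mny mxy (pvXpos vx (t - 1)) (pvYpos vy (t - 1))
          (pvDecay vx (t - 1)) (vy - (t - 1)) (pvApex vy (t - 1))) := by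
  intro k
  induction k with
  | zero =>
    intro t ht1 ht2
    rw [PySem.List.pyRange_one_eq_nil (by omega)]
    simp only [pvProbeGo]
    rw [pvLaunchLoop_eq]
    have hY : pvYpos vy (t - 1) + (vy - (t - 1)) = pvYpos vy t := by
      have h := pvYpos_step vy (t - 1)
      rw [show t - 1 + 1 = t from by ring] at h
      omega
    rw [hY]
    have hlt : pvYpos vy t < mny := pvYpos_big_lt vy mny t (by omega)
    rw [if_neg (by rintro ⟨_, _, h3, _⟩; omega), if_pos (Or.inr hlt)]
    simp [pvConv]
  | succ k ih =>
    intro t ht1 ht2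
    have hk : ((k + 1 : Nat) : Int) = (k : Int) + 1 := by push_cast; ring
    rw [hk] at ht2
    rw [PySem.List.pyRange_one_cons (by omega)]
    simp only [pvProbeGo]
    rw [pvLaunchLoop_eq]
    have hs : (0 : Int) ≤ t - 1 := by omega
    have hX : pvXpos vx (t - 1) + pvDecay vx (t - 1) = pvXpos vx t := by
      have h := pvXpos_step vx (t - 1) hs
      rw [show t - 1 + 1 = t from by ring] at h
      omega
    have hY : pvYpos vy (t - 1) + (vy - (t - 1)) = pvYpos vy t := by
      have h := pvYpos_step vy (t - 1)
      rw [show t - 1 + 1 = t from by ring] at h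
      omega
    rw [hX, hY]
    have hA : (if pvApex vy (t - 1) < pvYpos vy t then pvYpos vy t else pvApex vy (t - 1)) =
        pvApex vy t := by
      have h := pvApex_step vy (t - 1) hs
      rw [show t - 1 + 1 = t from by ring] at h
      exact h
    rw [hA]
    have hD : (if 0 < pvDecay vx (t - 1) then pvDecay vx (t - 1) - 1
        else if pvDecay vx (t - 1) < 0 then pvDecay vx (t - 1) + 1
        else pvDecay vx (t - 1)) = pvDecay vx t := by
      have h := pvDecay_step vx (t - 1) hs
      rw [show t - 1 + 1 = t from by ring] at h
      exact h
    rw [hD, show vy - (t - 1) - 1 = vy - t from by ring]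
    split_ifs with h1 h2
    · simp [pvConv]
    · simp [pvConv]
    · have ihh := ih (t + 1) (by omega) (by omega)
      simpa using ihh

theorem pvProbe_eq (vx vy mnx mxx mny mxy : Int) :
    pvProbe vx vy mnx mxx mny mxy = pvConv (pvLaunch vx vy mnx mxx mny mxy) := by
  have hT : (0 : Int) ≤ 2 * max vy 0 + |mny| + 2 := by
    have := le_max_right vy 0; have := abs_nonneg mny; omega
  have h := pvLoop_corr mnx mxx mny mxy vx vy (2 * max vy 0 + |mny| + 2).toNat 1 le_rfl (by omega)
  unfold pvProbe pvLaunch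
  norm_num at h
  rw [pvXpos_zero, pvYpos_zero, pvDecay_zero, pvApex_zero] at h
  simpa using h

-- A's nested loop as a fold over the flattened pair list
theorem pvA_flat (tmx tMx tmy tMy lbx ubx lby uby : Int) :
    check_velocities tmx tMx tmy tMy lbx ubx lby uby =
      ((PySem.List.pyRange lbx ubx 1).flatMap (fun vx =>
        (PySem.List.pyRange lby uby 1).map (fun vy => (vx, vy)))).foldl
          (pvFA tmx tMx tmy tMy) (0, 0, 0, 0) := by
  rw [List.foldl_flatMap]
  unfold check_velocities pvFA
  simp [List.foldl_map]

theorem pvHits_flat (tmx tMx tmy tMy lbx ubx lby uby : Int) :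
    ((PySem.List.pyRange lbx ubx 1).flatMap (fun vx =>
        (PySem.List.pyRange lby uby 1).map (fun vy => (vx, vy)))).filterMap
          (pvHF tmx tMx tmy tMy) =
      (PySem.List.pyRange lbx ubx 1).flatMap (fun vel_x =>
        (PySem.List.pyRange lby uby 1).filterMap (fun vel_y =>
          if (pvProbe vel_x vel_y tmx tMx tmy tMy).1 then
            some (vel_x, vel_y, (pvProbe vel_x vel_y tmx tMx tmy tMy).2)
          else none)) := by
  rw [List.filterMap_flatMap]
  simp [List.filterMap_map, pvHF, Function.comp]

-- the fold of A over any pair list, against the hit list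
theorem pvFold_corr (tmx tMx tmy tMy : Int) :
    ∀ (P : List (Int × Int)) (b px py n : Int),
      P.foldl (pvFA tmx tMx tmy tMy) (b, px, py, n) =
        ((pvBestFold (P.filterMap (pvHF tmx tMx tmy tMy)) (b, px, py)).1,
         (pvBestFold (P.filterMap (pvHF tmx tMx tmy tMy)) (b, px, py)).2.1,
         (pvBestFold (P.filterMap (pvHF tmx tMx tmy tMy)) (b, px, py)).2.2,
         n + ((P.filterMap (pvHF tmx tMx tmy tMy)).length : Int)) := by
  intro P
  induction P with
  | nil => intro b px py n; simp [pvBestFold]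
  | cons pr P ih =>
    intro b px py n
    simp only [List.foldl_cons, List.filterMap_cons]
    rcases hr : pvLaunch pr.1 pr.2 tmx tMx tmy tMy with ⟨hit, o⟩
    have hp := pvProbe_eq pr.1 pr.2 tmx tMx tmy tMy
    rw [hr] at hp
    cases hit with
    | false =>
      have hp' : pvProbe pr.1 pr.2 tmx tMx tmy tMy = (false, 0) := by
        simpa [pvConv] using hp
      have hfa : pvFA tmx tMx tmy tMy (b, px, py, n) pr = (b, px, py, n) := by
        simp [pvFA, hr]
      have hhf : pvHF tmx tMx tmy tMy pr = none := by
        simp [pvHF, hp']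
      rw [hfa, hhf]
      exact ih b px py n
    | true =>
      have hp' : pvProbe pr.1 pr.2 tmx tMx tmy tMy = (true, o.getD 0) := by
        simpa [pvConv] using hp
      have hhf : pvHF tmx tMx tmy tMy pr = some (pr.1, pr.2, o.getD 0) := by
        simp [pvHF, hp']
      rw [hhf]
      have hbf : ∀ st, pvBestFold ((pr.1, pr.2, o.getD 0) :: P.filterMap (pvHF tmx tMx tmy tMy)) st =
          pvBestFold (P.filterMap (pvHF tmx tMx tmy tMy))
            (if st.1 < o.getD 0 then (o.getD 0, pr.1, pr.2) else st) := by
        intro st; rfl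
      by_cases hlt : b < o.getD 0
      · have hfa : pvFA tmx tMx tmy tMy (b, px, py, n) pr = (o.getD 0, pr.1, pr.2, n + 1) := by
          simp [pvFA, hr, hlt]
        rw [hfa, ih (o.getD 0) pr.1 pr.2 (n + 1), hbf]
        simp only [if_pos hlt]
        apply congrArg (Prod.mk _)
        apply congrArg (Prod.mk _)
        apply congrArg (Prod.mk _)
        simp only [List.length_cons]
        push_cast
        ring
      · have hfa : pvFA tmx tMx tmy tMy (b, px, py, n) pr = (b, px, py, n + 1) := by
          simp [pvFA, hr, hlt]
        rw [hfa, ih b px py (n + 1), hbf]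
        simp only [if_neg hlt]
        apply congrArg (Prod.mk _)
        apply congrArg (Prod.mk _)
        apply congrArg (Prod.mk _)
        simp only [List.length_cons]
        push_cast
        ring

theorem pvFoldMax_le (H : List (Int × Int × Int)) (b : Int) : b ≤ pvFoldMax H b :=
  (PySem.List.le_foldl_max_int H (fun p => p.2.2) b).1

theorem pvFoldMax_attain (H : List (Int × Int × Int)) (b : Int) (h : b < pvFoldMax H b) :
    ∃ q ∈ H, q.2.2 = pvFoldMax H b := by
  have hmap : (H.map (fun p => p.2.2)).foldl max b = pvFoldMax H b := by
    rw [List.foldl_map]; rfl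
  rcases PySem.List.foldl_max_mem (H.map (fun p => p.2.2)) b with hmem | hmem
  · omega
  · rw [hmap] at hmem
    rw [List.mem_map] at hmem
    obtain ⟨q, hq, hq2⟩ := hmem
    exact ⟨q, hq, hq2⟩

theorem pvBest_char :
    ∀ (H : List (Int × Int × Int)) (b px py : Int),
      pvBestFold H (b, px, py) =
        (match H.find? (fun p => p.2.2 == pvFoldMax H b) with
         | some q => if b < pvFoldMax H b then (pvFoldMax H b, q.1, q.2.1) else (b, px, py)
         | none => (b, px, py)) := by
  intro H
  induction H with
  | nil => intro b px py; simp [pvBestFold, pvFoldMax]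
  | cons p Hs ih =>
    intro b px py
    have hcons : pvBestFold (p :: Hs) (b, px, py) =
        pvBestFold Hs (if b < p.2.2 then (p.2.2, p.1, p.2.1) else (b, px, py)) := rfl
    have hfm : pvFoldMax (p :: Hs) b = pvFoldMax Hs (max b p.2.2) := rfl
    rw [hcons, hfm]
    by_cases hba : b < p.2.2
    · have hmax : max b p.2.2 = p.2.2 := by omega
      rw [hmax, if_pos hba]
      have hge : p.2.2 ≤ pvFoldMax Hs p.2.2 := pvFoldMax_le Hs p.2.2
      by_cases heq : p.2.2 = pvFoldMax Hs p.2.2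
      · rw [List.find?_cons_of_pos (by simp [← heq]), ih p.2.2 p.1 p.2.1]
        rcases hf : Hs.find? (fun q => q.2.2 == pvFoldMax Hs p.2.2) with _ | q
        · rw [hf, ← heq]; simp [hba]
        · rw [hf, ← heq]; simp [hba]
      · have hlt : p.2.2 < pvFoldMax Hs p.2.2 := lt_of_le_of_ne hge heq
        obtain ⟨q', hq', hq2'⟩ := pvFoldMax_attain Hs p.2.2 hlt
        have hsome : (Hs.find? (fun q => q.2.2 == pvFoldMax Hs p.2.2)).isSome := by
          rw [List.find?_isSome]
          exact ⟨q', hq', by simp [hq2']⟩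
        rw [List.find?_cons_of_neg (by simp [heq]), ih p.2.2 p.1 p.2.1]
        rcases hf : Hs.find? (fun q => q.2.2 == pvFoldMax Hs p.2.2) with _ | q
        · rw [hf] at hsome; simp at hsome
        · rw [hf]
          simp [if_pos hlt, if_pos (show b < pvFoldMax Hs p.2.2 by omega)]
    · have hmax : max b p.2.2 = b := by omega
      rw [hmax, if_neg hba, ih b px py]
      by_cases hbM : b < pvFoldMax Hs b
      · rw [List.find?_cons_of_neg (by simp; omega)]
      · rcases hf : Hs.find? (fun q => q.2.2 == pvFoldMax Hs b) with _ | q <;> rw [hf] <;>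
          rcases hf2 : List.find? (fun p => p.2.2 == pvFoldMax Hs b) (p :: Hs) with _ | q2 <;>
            rw [hf2] <;> simp [hbM]

theorem pvProbeGo_snd_nonneg (vx vy mnx mxx mny mxy : Int) :
    ∀ ts : List Int, (∀ t ∈ ts, 1 ≤ t) → 0 ≤ (pvProbeGo vx vy mnx mxx mny mxy ts).2 := by
  intro ts
  induction ts with
  | nil => intro _; simp [pvProbeGo]
  | cons t ts ih =>
    intro h
    simp only [pvProbeGo]
    split_ifs with h1 h2
    · exact pvApex_nonneg vy t (h t (by simp))
    · simp
    · exact ih (fun u hu => h u (by simp [hu]))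

theorem pvHits_nonneg (tmx tMx tmy tMy : Int) (P : List (Int × Int)) :
    ∀ q ∈ P.filterMap (pvHF tmx tMx tmy tMy), 0 ≤ q.2.2 := by
  intro q hq
  rw [List.mem_filterMap] at hq
  obtain ⟨pr, _, hpr⟩ := hq
  unfold pvHF at hpr
  by_cases h : (pvProbe pr.1 pr.2 tmx tMx tmy tMy).1 = true
  · simp only [h, if_pos] at hpr
    have h2 : 0 ≤ (pvProbe pr.1 pr.2 tmx tMx tmy tMy).2 := by
      unfold pvProbe
      apply pvProbeGo_snd_nonneg
      intro t ht
      rw [PySem.List.mem_pyRange_one] at ht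
      omega
    cases hpr; simpa using h2
  · simp [h] at hpr

theorem pvMaxD_eq (H : List (Int × Int × Int)) (hpos : ∀ q ∈ H, 0 ≤ q.2.2) :
    PySem.List.maxD (H.map (fun p => p.2.2)) (fun a => a) 0 = pvFoldMax H 0 := by
  cases H with
  | nil =>
    have h : PySem.List.max? ([] : List Int) (fun a => a) = none := by
      rw [PySem.List.max?_eq_none_iff]
    simp [pvFoldMax, PySem.List.maxD, h]
  | cons q Hs =>
    have ha : 0 ≤ q.2.2 := hpos q (by simp)
    have h1 : PySem.List.maxD ((q :: Hs).map (fun p => p.2.2)) (fun a => a) 0 =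
        (Hs.map (fun p => p.2.2)).foldl max q.2.2 := by
      simp [PySem.List.maxD, PySem.List.max?_id_cons]
    rw [h1]
    have h2 : pvFoldMax (q :: Hs) 0 = pvFoldMax Hs q.2.2 := by
      show pvFoldMax Hs (max 0 q.2.2) = pvFoldMax Hs q.2.2
      rw [max_eq_right ha]
    rw [h2, List.foldl_map]
    rfl

-- ===== VERDICT (by name: the statement is the Claim_ definition above) =====
theorem check_velocities_spec : Claim_equal_check_velocities := by
  intro tmx tMx tmy tMy lbx ubx lby uby _
  unfold Spec_check_velocities
  rw [pvA_flat, pvFold_corr]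
  have hpos := pvHits_nonneg tmx tMx tmy tMy
    ((PySem.List.pyRange lbx ubx 1).flatMap (fun vx =>
      (PySem.List.pyRange lby uby 1).map (fun vy => (vx, vy))))
  simp only [check_velocities_alt]
  rw [← pvHits_flat tmx tMx tmy tMy lbx ubx lby uby]
  rw [pvMaxD_eq _ hpos]
  rw [pvBest_char _ 0 0 0]
  by_cases h0 : (0 : Int) < pvFoldMax
      (((PySem.List.pyRange lbx ubx 1).flatMap (fun vx =>
        (PySem.List.pyRange lby uby 1).map (fun vy => (vx, vy)))).filterMap
          (pvHF tmx tMx tmy tMy)) 0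
  · rw [if_pos h0]
    rcases hf : (((PySem.List.pyRange lbx ubx 1).flatMap (fun vx =>
        (PySem.List.pyRange lby uby 1).map (fun vy => (vx, vy)))).filterMap
          (pvHF tmx tMx tmy tMy)).find? (fun p => p.2.2 == pvFoldMax
            (((PySem.List.pyRange lbx ubx 1).flatMap (fun vx =>
              (PySem.List.pyRange lby uby 1).map (fun vy => (vx, vy)))).filterMap
                (pvHF tmx tMx tmy tMy)) 0) with _ | q <;> rw [hf]
    · simp
    · rcases q with ⟨qa, qb, qc⟩
      simp [if_pos h0]
  · rw [if_neg h0]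
    rcases hf : (((PySem.List.pyRange lbx ubx 1).flatMap (fun vx =>
        (PySem.List.pyRange lby uby 1).map (fun vy => (vx, vy)))).filterMap
          (pvHF tmx tMx tmy tMy)).find? (fun p => p.2.2 == pvFoldMax
            (((PySem.List.pyRange lbx ubx 1).flatMap (fun vx =>
              (PySem.List.pyRange lby uby 1).map (fun vy => (vx, vy)))).filterMap
                (pvHF tmx tMx tmy tMy)) 0) with _ | q <;> rw [hf] <;> simp [h0]
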